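-- pv_equiv track=rewrite | github.com/eugenebireta/biretos-automation | insales_to_shopware_migration/analyze_duplicates.py | find_duplicate_property_groups
-- ===== SOURCE A (Python) =====
-- from collections import defaultdict
-- from typing import Any, Dict, List, Set
--
-- def normalize_name(name: str) -> str:
--     """Нормализует имя для сравнения (lowercase + strip)."""
--     return (name or "").lower().strip()
--
-- def find_duplicate_property_groups(groups: List[Dict[str, Any]]) -> Dict[str, List[Dict[str, Any]]]:
--     """Находит дубликаты Property Groups по нормализованному имени."""
--     groups_by_name: Dict[str, List[Dict[str, Any]]] = defaultdict(list)
--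
--     for group in groups:
--         name = group.get("name", "")
--         normalized = normalize_name(name)
--         if normalized:
--             groups_by_name[normalized].append(group)
--
--     # Оставляем только дубликаты (2+ группы с одинаковым именем)
--     duplicates = {
--         name: group_list
--         for name, group_list in groups_by_name.items()
--         if len(group_list) > 1
--     }
--
--     return duplicates
-- ===== SOURCE B (Python) =====
-- def normalize_name(name: str) -> str:
--     """Нормализует имя для сравнения (lowercase + strip)."""
--     return (name or "").lower().strip()
--
-- def find_duplicate_property_groups(groups):
--     keyed = [(normalize_name(g.get("name", "")), g) for g in groups]
--     order = list(dict.fromkeys(k for k, _ in keyed if k))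
--     result = {}
--     for k in order:
--         matched = [g for kk, g in keyed if kk == k]
--         if len(matched) > 1:
--             result[k] = matched
--     return result
-- ===== Notes on version B (the rewrite author's own statement) =====
-- stated objective: alternative
-- what changed: Instead of one pass accumulating a dict of lists and then filtering it, B computes the normalized key of every group once, dedupes the non-empty keys in first-occurrence order, and for each distinct key gathers its groups by a direct scan, keeping only keys with 2+ groups.
import Mathlib
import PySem

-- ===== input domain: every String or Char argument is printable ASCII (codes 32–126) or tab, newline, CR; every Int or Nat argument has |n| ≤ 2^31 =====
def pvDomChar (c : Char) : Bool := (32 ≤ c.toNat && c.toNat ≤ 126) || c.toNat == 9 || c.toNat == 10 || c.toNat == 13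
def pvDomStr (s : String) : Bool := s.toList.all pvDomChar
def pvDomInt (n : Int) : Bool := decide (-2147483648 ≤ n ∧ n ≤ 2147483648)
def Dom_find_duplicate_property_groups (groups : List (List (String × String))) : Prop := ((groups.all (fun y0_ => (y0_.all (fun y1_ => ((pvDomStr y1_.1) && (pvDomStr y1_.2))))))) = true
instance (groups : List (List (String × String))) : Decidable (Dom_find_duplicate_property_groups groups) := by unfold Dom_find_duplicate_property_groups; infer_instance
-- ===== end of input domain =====

-- B replaces the dict-of-lists accumulation + post-filter by: distinct non-empty keys in first-occurrence order, then one scan per key (alternative decomposition, not faster).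

-- ===== PORT A =====
-- normalize_name: (name or "").lower().strip()
def pyNormalizeName (name : String) : String :=
  PySem.Str.strip (PySem.Str.lower (if name = "" then "" else name))

def find_duplicate_property_groups (groups : List (List (String × String))) : List (String × List (List (String × String))) :=
  let groups_by_name := groups.foldl (fun d g =>
      let name := (PySem.Dict.mk g).getD "name" ""
      let normalized := pyNormalizeName name
      if normalized ≠ "" then d.modify normalized [] (· ++ [g]) else d)
    PySem.Dict.empty
  groups_by_name.items.filter (fun p => p.2.length > 1)

-- ===== PORT B =====
def pvKey (g : List (String × String)) : String :=
  pyNormalizeName ((PySem.Dict.mk g).getD "name" "")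

def find_duplicate_property_groups_alt (groups : List (List (String × String))) : List (String × List (List (String × String))) :=
  let keyed := groups.map (fun g => (pvKey g, g))
  let order := PySem.Set.ofList ((keyed.map (·.1)).filter (fun k => k ≠ ""))
  order.foldl (fun res k =>
      let matched := (keyed.filter (fun q => q.1 == k)).map (·.2)
      if matched.length > 1 then res ++ [(k, matched)] else res) []

-- ===== PRECONDITION & SPEC =====
def Spec_find_duplicate_property_groups (groups : List (List (String × String))) (out : List (String × List (List (String × String)))) : Prop := out = find_duplicate_property_groups_alt groups
instance (groups : List (List (String × String))) (out : List (String × List (List (String × String)))) : Decidable (Spec_find_duplicate_property_groups groups out) := by unfold Spec_find_duplicate_property_groups; infer_instance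

-- ===== CLAIM (what is proved, stated in full; the proofs are below) =====
def Claim_equal_find_duplicate_property_groups : Prop := ∀ (groups : List (List (String × String))), Dom_find_duplicate_property_groups groups → Spec_find_duplicate_property_groups groups (find_duplicate_property_groups groups)

-- ===== LEMMAS AND PROOFS =====
-- helper abbreviations (proof-side only)
def pvPair (g : List (String × String)) : String × List (String × String) := (pvKey g, g)
def pvFgs (groups : List (List (String × String))) : List (List (String × String)) :=
  groups.filter (fun g => decide (pvKey g ≠ ""))
def pvM (groups : List (List (String × String))) (k : String) : List (List (String × String)) :=
  ((groups.map pvPair).filter (fun q => q.1 == k)).map (·.2)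
def pvV (groups : List (List (String × String))) (k : String) : List (List (String × String)) :=
  (((pvFgs groups).map pvPair).filter (fun q => q.1 == k)).map (·.2)
def pvL (groups : List (List (String × String))) : List String :=
  PySem.Set.ofList ((groups.map pvKey).filter (fun s => decide (s ≠ "")))

theorem pvA_eq (groups : List (List (String × String))) :
    find_duplicate_property_groups groups
      = ((pvL groups).filter (fun k => decide ((pvV groups k).length > 1))).map
          (fun k => (k, pvV groups k)) := by
  unfold find_duplicate_property_groups
  simp only []
  rw [PySem.List.foldl_ite_eq_foldl_filter]
  show (List.filter (fun p => decide (p.2.length > 1))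
      ((pvFgs groups).foldl (fun d g => d.modify (pvKey g) [] fun x => x ++ [g]) PySem.Dict.empty).items)
    = ((pvL groups).filter (fun k => decide ((pvV groups k).length > 1))).map
        (fun k => (k, pvV groups k))
  have hd : (pvFgs groups).foldl (fun d g => d.modify (pvKey g) [] fun x => x ++ [g]) PySem.Dict.empty
      = ((pvFgs groups).map pvPair).foldl (fun d p => d.modify p.1 [] fun x => x ++ [p.2]) PySem.Dict.empty :=
    by rw [List.foldl_map]; simp [pvPair]
  rw [hd]
  have hnd : (((pvFgs groups).map pvPair).foldl (fun d p => d.modify p.1 [] fun x => x ++ [p.2]) PySem.Dict.empty).keys.Nodup := by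
    exact PySem.Dict.nodup_keys_foldl_modify_key _ _ _ _ _ (by simp)
  rw [PySem.Dict.items_eq_map_keys _ hnd []]
  simp only [PySem.Dict.getD_foldl_modify_append, PySem.Dict.getD_empty, List.nil_append]
  rw [PySem.Dict.keys_foldl_modify_key]
  have hmf : ((pvFgs groups).map pvPair).map (fun p => p.1) = (groups.map pvKey).filter (fun s => decide (s ≠ "")) := by
    unfold pvFgs
    rw [List.filter_map]
    simp [pvPair, Function.comp_def]
  rw [List.filter_map]
  simp only [PySem.Dict.keys_empty, hmf]
  rfl

theorem pvB_eq (groups : List (List (String × String))) :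
    find_duplicate_property_groups_alt groups
      = ((pvL groups).filter (fun k => decide ((pvM groups k).length > 1))).map
          (fun k => (k, pvM groups k)) := by
  unfold find_duplicate_property_groups_alt pvL pvM pvPair
  simp only [List.map_map]
  rw [PySem.List.foldl_append_ite]
  simp [Function.comp_def]

theorem pvMV (groups : List (List (String × String))) (k : String) (hk : k ≠ "") :
    pvM groups k = pvV groups k := by
  unfold pvM pvV pvFgs
  induction groups with
  | nil => rfl
  | cons g gs ih =>
    by_cases h : pvKey g = k
    · simp [pvPair, h, hk, ih]
    · by_cases h2 : pvKey g = ""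
      · simp [pvPair, h2, Ne.symm hk, ih]
      · simp [pvPair, h, h2, ih]

theorem pv_main (groups : List (List (String × String))) :
    find_duplicate_property_groups groups = find_duplicate_property_groups_alt groups := by
  rw [pvA_eq, pvB_eq]
  have hf : (pvL groups).filter (fun k => decide ((pvV groups k).length > 1))
      = (pvL groups).filter (fun k => decide ((pvM groups k).length > 1)) := by
    apply List.filter_congr
    intro k hk
    have hne : k ≠ "" := by
      have := (PySem.Set.mem_ofList _ _).1 hk
      simp at this
      exact this.2
    rw [pvMV groups k hne]
  rw [hf]
  apply List.map_congr_left
  intro k hk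
  have hne : k ≠ "" := by
    have hk' := List.mem_of_mem_filter hk
    have := (PySem.Set.mem_ofList _ _).1 hk'
    simp at this
    exact this.2
  rw [pvMV groups k hne]

-- ===== VERDICT (by name: the statement is the Claim_ definition above) =====
theorem find_duplicate_property_groups_spec : Claim_equal_find_duplicate_property_groups := by
  intro groups _
  unfold Spec_find_duplicate_property_groups
  exact pv_main groups
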